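-- pv_equiv track=rewrite | github.com/kiyoung-aws/Unified-Studio-for-Amazon-Sagemaker | migration/bring-your-own-gdc-assets/byogdc.py | _get_s3_subpaths
-- ===== SOURCE A (Python) =====
-- def _get_s3_subpaths(s3_path):
--     """
--     Get all sub-paths for a given S3 path.
--     Returns list of paths from bucket to full path.
--     """
--
--     # Remove trailing slash if present
--     s3_path = s3_path.rstrip('/')
--
--     paths = []
--     # Split into parts
--     parts = s3_path.split('/')
--     current = parts[0] + '//' + parts[2]  # s3://bucket
--     paths.append(current)
--
--     # Add each subfolder level
--     for part in parts[3:]: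
--         current = current + '/' + part
--         paths.append(current)
--
--     return paths
-- ===== SOURCE B (Python) =====
-- def _get_s3_subpaths(s3_path):
--     """
--     Get all sub-paths for a given S3 path.
--     Returns list of paths from bucket to full path.
--     """
--     parts = s3_path.rstrip('/').split('/')
--     bucket = parts[0] + '//' + parts[2]  # s3://bucket (IndexError on malformed paths, as before)
--     return [bucket] + [bucket + '/' + '/'.join(parts[3:i]) for i in range(4, len(parts) + 1)]
-- ===== Notes on version B (the rewrite author's own statement) =====
-- stated objective: alternative
-- what changed: Each subpath is rebuilt independently as a slice-and-join rebuild from the bucket base over a range of slice endpoints, instead of growing a running-concatenation accumulator through a loop.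
import Mathlib
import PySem

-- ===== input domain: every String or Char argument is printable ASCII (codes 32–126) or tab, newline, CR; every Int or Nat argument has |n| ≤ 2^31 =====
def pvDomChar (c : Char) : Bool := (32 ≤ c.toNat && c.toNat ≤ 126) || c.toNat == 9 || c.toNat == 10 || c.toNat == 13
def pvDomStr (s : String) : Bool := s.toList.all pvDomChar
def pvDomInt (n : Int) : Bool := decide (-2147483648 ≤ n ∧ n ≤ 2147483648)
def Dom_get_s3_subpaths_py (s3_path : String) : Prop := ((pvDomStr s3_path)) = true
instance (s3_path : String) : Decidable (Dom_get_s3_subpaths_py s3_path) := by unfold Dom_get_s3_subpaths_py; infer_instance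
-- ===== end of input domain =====

-- B rebuilds each subpath independently by slice-and-join from the bucket base instead of A's running-concatenation accumulator; same cost, different decomposition (objective: alternative).

-- exact port of s.rstrip('/') (Python strips only '/' characters, from the right end)
def pvRstripSlash (cs : List Char) : List Char := (cs.reverse.dropWhile (fun c => c == '/')).reverse

-- ===== PORT A =====
def get_s3_subpaths_py (s3_path : String) : List String :=
  let parts := PySem.Chars.splitOn (pvRstripSlash s3_path.toList) ['/']
  match PySem.List.pyGet? parts 0, PySem.List.pyGet? parts 2 with
  | some p0, some p2 =>
    let current := p0 ++ ['/', '/'] ++ p2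
    let st := (PySem.List.slice parts (some 3) none).foldl
        (fun (acc : List (List Char) × List Char) part =>
          (acc.1 ++ [acc.2 ++ '/' :: part], acc.2 ++ '/' :: part)) ([current], current)
    st.1.map String.ofList
  | _, _ => []   -- parts[2] (or parts[0]) raises IndexError in Python: outside Pre_

-- ===== PORT B =====
def get_s3_subpaths_py_alt (s3_path : String) : List String :=
  let parts := PySem.Chars.splitOn (pvRstripSlash s3_path.toList) ['/']
  match PySem.List.pyGet? parts 0 with
  | none => []
  | some p0 =>
    match PySem.List.pyGet? parts 2 with
    | none => []   -- parts[2] raises IndexError in Python, as in A: outside Pre_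
    | some p2 =>
      let bucket := p0 ++ ['/', '/'] ++ p2
      String.ofList bucket ::
        (PySem.List.pyRange 4 ((parts.length : Int) + 1) 1).map
          (fun i => String.ofList (bucket ++ '/' :: PySem.Chars.join ['/'] (PySem.List.slice parts (some 3) (some i))))

-- ===== PRECONDITION & SPEC =====
-- Pre_ excludes exactly the inputs where both Pythons raise IndexError on parts[2]: paths that,
-- after stripping trailing slashes, split on slashes into fewer than 3 parts.
def Pre_get_s3_subpaths_py (s3_path : String) : Prop :=
  3 ≤ (PySem.Chars.splitOn (pvRstripSlash s3_path.toList) ['/']).length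
instance (s3_path : String) : Decidable (Pre_get_s3_subpaths_py s3_path) := by
  unfold Pre_get_s3_subpaths_py; infer_instance

def pvWitness_get_s3_subpaths_py : String := "s3://bucket/f1"

def Spec_get_s3_subpaths_py (s3_path : String) (out : List String) : Prop := out = get_s3_subpaths_py_alt s3_path
instance (s3_path : String) (out : List String) : Decidable (Spec_get_s3_subpaths_py s3_path out) := by unfold Spec_get_s3_subpaths_py; infer_instance

-- ===== CLAIM (what is proved, stated in full; the proofs are below) =====
def Claim_equal_get_s3_subpaths_py : Prop := ∀ (s3_path : String), Dom_get_s3_subpaths_py s3_path → Pre_get_s3_subpaths_py s3_path → Spec_get_s3_subpaths_py s3_path (get_s3_subpaths_py s3_path)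

-- ===== LEMMAS AND PROOFS =====

-- A's accumulator, characterised: the list of incremental paths cur, cur/p1, cur/p1/p2, …
def pvChain (cur : List Char) : List (List Char) → List (List Char)
  | [] => [cur]
  | p :: rest => cur :: pvChain (cur ++ '/' :: p) rest

-- '/'-join of a tail of folders: '/p1/p2…'
def pvJoinTail : List (List Char) → List Char
  | [] => []
  | p :: r => '/' :: p ++ pvJoinTail r

theorem pv_lemA (rest : List (List Char)) : ∀ (cur : List Char) (acc : List (List Char)),
    (rest.foldl (fun (a : List (List Char) × List Char) part =>
        (a.1 ++ [a.2 ++ '/' :: part], a.2 ++ '/' :: part)) (acc ++ [cur], cur)).1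
      = acc ++ pvChain cur rest := by
  induction rest with
  | nil => intro cur acc; simp [pvChain]
  | cons p rest ih =>
    intro cur acc
    simp only [List.foldl_cons]
    calc (rest.foldl (fun (a : List (List Char) × List Char) part =>
            (a.1 ++ [a.2 ++ '/' :: part], a.2 ++ '/' :: part))
            ((acc ++ [cur]) ++ [cur ++ '/' :: p], cur ++ '/' :: p)).1
        = (acc ++ [cur]) ++ pvChain (cur ++ '/' :: p) rest := ih (cur ++ '/' :: p) (acc ++ [cur])
      _ = acc ++ pvChain cur (p :: rest) := by simp [pvChain]

theorem pv_lemJoin (l : List (List Char)) : ∀ (p : List Char),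
    PySem.Chars.join ['/'] (p :: l) = p ++ pvJoinTail l := by
  induction l with
  | nil => intro p; simp [PySem.Chars.join_singleton, pvJoinTail]
  | cons q r ih =>
    intro p
    rw [PySem.Chars.join_cons_cons, ih q]
    simp [pvJoinTail]

-- for a nonempty folder tail, '/' :: join is exactly pvJoinTail
theorem pv_joinTail_cons (p : List Char) (r : List (List Char)) :
    '/' :: PySem.Chars.join ['/'] (p :: r) = pvJoinTail (p :: r) := by
  rw [pv_lemJoin r p]; simp [pvJoinTail]

theorem pv_lemChain (rest : List (List Char)) : ∀ (cur : List Char),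
    pvChain cur rest
      = cur :: (List.range rest.length).map (fun k => cur ++ pvJoinTail (rest.take (k+1))) := by
  induction rest with
  | nil => intro cur; simp [pvChain]
  | cons p rest ih =>
    intro cur
    simp only [pvChain, List.length_cons]
    rw [List.range_succ_eq_map, List.map_cons, List.map_map, ih (cur ++ '/' :: p)]
    congr 1
    congr 1
    · simp [pvJoinTail]
    · apply List.map_congr_left
      intro k _
      simp [pvJoinTail]

theorem pv_range (b : Int) (n : Nat) (hb : b = (n:Int) + 4) :
    PySem.List.pyRange 4 b 1 = (List.range n).map (fun (k : Nat) => 4 + (k:Int)) := by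
  subst hb
  rw [PySem.List.pyRange_one]
  have h1 : ((n:Int) + 4 - 4).toNat = n := by omega
  rw [h1]

theorem pv_slice (p0 p1 p2 : List Char) (rest : List (List Char)) (k : Nat) :
    PySem.List.slice (p0 :: p1 :: p2 :: rest) (some 3) (some (4 + (k:Int))) = rest.take (k+1) := by
  have h := PySem.List.slice_natCast (p0 :: p1 :: p2 :: rest) 3 (4+k)
  have e : ((3:Nat):Int) = (3:Int) := by norm_num
  have e2 : ((4 + k : Nat) : Int) = 4 + (k:Int) := by push_cast; ring
  rw [e, e2] at h
  rw [h]
  have e3 : 4 + k - 3 = k + 1 := by omega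
  simp [e3]

-- ===== VERDICT (by name: the statement is the Claim_ definition above) =====
theorem get_s3_subpaths_py_spec : Claim_equal_get_s3_subpaths_py := by
  intro s3_path _ hpre
  unfold Spec_get_s3_subpaths_py get_s3_subpaths_py get_s3_subpaths_py_alt
  unfold Pre_get_s3_subpaths_py at hpre
  set parts := PySem.Chars.splitOn (pvRstripSlash s3_path.toList) ['/'] with hparts
  clear_value parts
  match parts, hpre with
  | p0 :: p1 :: p2 :: rest, _ =>
    dsimp only
    have hg0 : PySem.List.pyGet? (p0 :: p1 :: p2 :: rest) 0 = some p0 := by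
      have hc : (0:Int) ≤ ((rest.length : Int)) + 1 + 1 := by positivity
      simp [PySem.List.pyGet?, PySem.List.pyIdx?, hc]
    have hg2 : PySem.List.pyGet? (p0 :: p1 :: p2 :: rest) 2 = some p2 := by
      have hc : (2:Int) ≤ ((rest.length : Int)) + 1 + 1 := by omega
      simp [PySem.List.pyGet?, PySem.List.pyIdx?, hc]
    rw [hg0, hg2]
    dsimp only
    have hs : PySem.List.slice (p0 :: p1 :: p2 :: rest) (some 3) none = rest := by
      simp [pysem]
    rw [hs]
    rw [show (([p0 ++ ['/', '/'] ++ p2], p0 ++ ['/', '/'] ++ p2) : List (List Char) × List Char)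
          = (([] : List (List Char)) ++ [p0 ++ ['/', '/'] ++ p2], p0 ++ ['/', '/'] ++ p2) from rfl,
        pv_lemA rest (p0 ++ ['/', '/'] ++ p2) [], List.nil_append,
        pv_lemChain rest (p0 ++ ['/', '/'] ++ p2), List.map_cons,
        pv_range _ rest.length (by push_cast [List.length_cons]; ring), List.map_map, List.map_map]
    congr 1
    apply List.map_congr_left
    intro k hk
    simp only [Function.comp_apply]
    rw [pv_slice p0 p1 p2 rest k]
    have hne : rest.take (k+1) ≠ [] := by
      have : k < rest.length := List.mem_range.mp hk
      cases rest with
      | nil => simp at this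
      | cons r0 r' => simp
    obtain ⟨q, l, hql⟩ : ∃ q l, rest.take (k+1) = q :: l := by
      cases h : rest.take (k+1) with
      | nil => exact absurd h hne
      | cons q l => exact ⟨q, l, rfl⟩
    rw [hql, ← pv_joinTail_cons q l, ← hql]
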